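-- pv_equiv track=rewrite | github.com/okoyecharles/ds-and-algo | python/mock-interview/word-count-engine.py | word_count_engine
-- ===== SOURCE A (Python) =====
-- def sanitize(word):
--   res = ''
--   for char in word:
--     if char.isalpha(): res = res + char.lower()
--   return res
--
-- def word_count_engine(document):
--   words = document.split(' ');
--   frequency = {}
--
--   for i, word in enumerate(words):
--     valid_word = sanitize(word)
--     if valid_word:
--       if valid_word not in frequency:
--         # (freq, pos)
--         frequency[valid_word] = [0, i]
--       frequency[valid_word][0] += 1
--
--   words = []
--   # frequency = { word: (freq, pos) }
--   for word, freq_pos in frequency.items():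
--     words.append([word, freq_pos])
--
--   def sort_by_freq(item):
--     return (item[1][0], -1 * item[1][1])
--
--   # words = [ ['word', (freq, pos)] ]
--   words.sort(key=sort_by_freq, reverse=True)
--
--   # words are sorted
--   res = []
--   for word, freq_pos in words:
--     res.append([word, str(freq_pos[0])])
--
--   return res
-- ===== SOURCE B (Python) =====
-- def word_count_engine(document):
--     # one pass: count sanitized words; dict insertion order = order of first occurrence
--     counts = {}
--     for word in document.split(' '):
--         s = ''.join(ch.lower() for ch in word if ch.isalpha())
--         if s:
--             counts[s] = counts.get(s, 0) + 1
--     if not counts: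
--         return []
--     # bucket by frequency; each bucket keeps first-occurrence order (= position ascending)
--     maxf = max(counts.values())
--     buckets = [[] for _ in range(maxf + 1)]
--     for w, f in counts.items():
--         buckets[f].append(w)
--     res = []
--     for f in range(maxf, 0, -1):
--         for w in buckets[f]:
--             res.append([w, str(f)])
--     return res
-- ===== Notes on version B (the rewrite author's own statement) =====
-- stated objective: alternative
-- what changed: Replaces the comparison sort on (freq, -pos) with a counting/bucket pass over frequencies, using dict insertion order (first occurrence = ascending position) for the positional tie-break, and drops the per-word position bookkeeping entirely.
import Mathlib
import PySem

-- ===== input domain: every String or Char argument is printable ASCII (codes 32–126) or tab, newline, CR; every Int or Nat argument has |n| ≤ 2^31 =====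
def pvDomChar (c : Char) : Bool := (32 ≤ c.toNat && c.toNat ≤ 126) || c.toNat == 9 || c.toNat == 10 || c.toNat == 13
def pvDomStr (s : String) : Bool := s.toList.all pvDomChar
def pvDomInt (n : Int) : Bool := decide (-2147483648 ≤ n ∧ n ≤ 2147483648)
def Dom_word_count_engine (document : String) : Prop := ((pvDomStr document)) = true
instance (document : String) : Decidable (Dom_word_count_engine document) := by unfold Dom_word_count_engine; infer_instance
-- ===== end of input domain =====

-- B replaces A's comparison sort on (freq, -pos) by a bucket pass over frequencies, using dict
-- insertion order (first occurrence = ascending position) for the positional tie-break.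

-- ===== PORT A =====
-- char.isalpha() / char.lower() are PySem.Chars.isalpha / lowerChar (exact on the ASCII domain)
def pvSanitizeA (word : String) : String :=
  String.mk (word.toList.foldl
    (fun res c => if PySem.Chars.isalpha c then res ++ [PySem.Chars.lowerChar c] else res) [])

def word_count_engine (document : String) : List (List String) :=
  let words := (PySem.Str.split? document " ").getD []   -- sep " " ≠ "", so split? is always `some`
  let frequency := (PySem.List.enumerate words 0).foldl
    (fun (d : PySem.Dict String (Int × Int)) iw =>
      let valid := pvSanitizeA iw.2
      if valid ≠ "" then
        let d1 := if d.contains valid then d else d.insert valid (0, iw.1)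
        -- frequency[valid][0] += 1 : key `valid` is always present here, so `modify` is exact
        d1.modify valid (0, 0) (fun fp => (fp.1 + 1, fp.2))
      else d)
    PySem.Dict.empty
  let words2 := frequency.items.foldl (fun acc wf => acc ++ [wf]) []
  let sortedW := PySem.List.sorted2 words2 (fun item => item.2.1) (fun item => -1 * item.2.2) true
  sortedW.foldl (fun res wf => res ++ [[wf.1, PySem.Int.toStr wf.2.1]]) []

-- ===== PORT B =====
def pvSanitizeB (word : String) : String :=
  String.mk ((word.toList.filter PySem.Chars.isalpha).map PySem.Chars.lowerChar)

def word_count_engine_alt (document : String) : List (List String) :=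
  let counts := ((PySem.Str.split? document " ").getD []).foldl
    (fun (d : PySem.Dict String Int) w =>
      let s := pvSanitizeB w
      if s ≠ "" then d.insert s (d.getD s 0 + 1) else d)
    PySem.Dict.empty
  if counts.items = [] then []
  else
    let maxf := (PySem.List.max? counts.values (fun v => v)).getD 0   -- nonempty here, so `some`
    let buckets0 : List (List String) := (PySem.List.pyRange 0 (maxf + 1) 1).map (fun _ => [])
    let buckets := counts.items.foldl
      (fun bs wf => PySem.List.pySetD bs wf.2 (PySem.List.pyGetD bs wf.2 [] ++ [wf.1])) buckets0
    (PySem.List.pyRange maxf 0 (-1)).foldl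
      (fun res f => (PySem.List.pyGetD buckets f []).foldl
        (fun r w => r ++ [[w, PySem.Int.toStr f]]) res) []

-- ===== PRECONDITION & SPEC =====
def Spec_word_count_engine (document : String) (out : List (List String)) : Prop := out = word_count_engine_alt document
instance (document : String) (out : List (List String)) : Decidable (Spec_word_count_engine document out) := by unfold Spec_word_count_engine; infer_instance

-- ===== CLAIM (what is proved, stated in full; the proofs are below) =====
def Claim_equal_word_count_engine : Prop := ∀ (document : String), Dom_word_count_engine document → Spec_word_count_engine document (word_count_engine document)

-- ===== LEMMAS AND PROOFS =====

-- the two sanitizers agree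
theorem pvSanitize_eq (w : String) : pvSanitizeA w = pvSanitizeB w := by
  unfold pvSanitizeA pvSanitizeB
  rw [PySem.List.foldl_append_if]
  simp

-- A's loop body and B's loop body (definitionally the lambdas of the two ports)
def pvAStep (d : PySem.Dict String (Int × Int)) (iw : Int × String) : PySem.Dict String (Int × Int) :=
  let valid := pvSanitizeA iw.2
  if valid ≠ "" then
    let d1 := if d.contains valid then d else d.insert valid (0, iw.1)
    d1.modify valid (0, 0) (fun fp => (fp.1 + 1, fp.2))
  else d

def pvBStep (d : PySem.Dict String Int) (w : String) : PySem.Dict String Int :=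
  let s := pvSanitizeB w
  if s ≠ "" then d.insert s (d.getD s 0 + 1) else d

-- invariant tying A's dict to B's dict
def pvInv (i : Int) (dA : PySem.Dict String (Int × Int)) (dB : PySem.Dict String Int) : Prop :=
  dB.items = dA.items.map (fun kv => (kv.1, kv.2.1)) ∧
  dA.keys.Nodup ∧
  dA.items.Pairwise (fun a b => a.2.2 < b.2.2) ∧
  (∀ kv ∈ dA.items, kv.2.2 < i) ∧
  (∀ kv ∈ dA.items, 1 ≤ kv.2.1)

-- items relation gives agreeing lookups
theorem pvGet?_rel (dA : PySem.Dict String (Int × Int)) (dB : PySem.Dict String Int)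
    (h : dB.items = dA.items.map (fun kv => (kv.1, kv.2.1))) (k : String) :
    dB.get? k = (dA.get? k).map (·.1) := by
  unfold PySem.Dict.get?
  rw [h, List.find?_map]
  have hp : ((fun (p : String × Int) => p.1 == k) ∘ (fun (kv : String × Int × Int) => (kv.1, kv.2.1)))
      = (fun (p : String × Int × Int) => p.1 == k) := rfl
  rw [hp]
  cases List.find? (fun (p : String × Int × Int) => p.1 == k) dA.items <;> rfl

theorem pvContains_rel (dA : PySem.Dict String (Int × Int)) (dB : PySem.Dict String Int)
    (h : dB.items = dA.items.map (fun kv => (kv.1, kv.2.1))) (k : String) :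
    dB.contains k = dA.contains k := by
  rw [PySem.Dict.contains_eq_isSome_get?, PySem.Dict.contains_eq_isSome_get?, pvGet?_rel dA dB h k]
  cases dA.get? k <;> rfl

theorem pvInv_step (i : Int) (w : String) (dA : PySem.Dict String (Int × Int))
    (dB : PySem.Dict String Int) (h : pvInv i dA dB) :
    pvInv (i + 1) (pvAStep dA (i, w)) (pvBStep dB w) := by
  obtain ⟨hrel, hnd, hpw, hlt, hfr⟩ := h
  unfold pvAStep pvBStep
  simp only [pvSanitize_eq]
  by_cases hne : pvSanitizeB w = ""
  · simp only [hne, ne_eq, not_true_eq_false, if_false]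
    exact ⟨hrel, hnd, hpw, fun kv hm => by have := hlt kv hm; omega, hfr⟩
  · set s := pvSanitizeB w with hsdef
    simp only [ne_eq, hne, not_false_eq_true, if_true]
    have hcont := pvContains_rel dA dB hrel s
    by_cases hc : dA.contains s = true
    · -- existing key: both dicts overwrite in place
      obtain ⟨fp, hfp⟩ : ∃ fp, dA.get? s = some fp := by
        rw [PySem.Dict.contains_eq_isSome_get?] at hc
        cases hq : dA.get? s
        · rw [hq] at hc; exact absurd hc (by simp)
        · exact ⟨_, rfl⟩
      have hgA : dA.getD s (0, 0) = fp := by unfold PySem.Dict.getD; rw [hfp]; rfl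
      have hgB : dB.getD s 0 = fp.1 := by
        unfold PySem.Dict.getD; rw [pvGet?_rel dA dB hrel s, hfp]; rfl
      have hA : (if dA.contains s = true then dA else dA.insert s (0, i)).modify s (0, 0)
          (fun fp => (fp.1 + 1, fp.2)) = dA.insert s (fp.1 + 1, fp.2) := by
        rw [if_pos hc]; unfold PySem.Dict.modify; rw [hgA]
      have hBc : dB.contains s = true := by rw [hcont]; exact hc
      rw [hA, hgB]
      -- the replaced entry in dA.items is exactly (s, fp)
      have hval : ∀ kv ∈ dA.items, kv.1 = s → kv.2 = fp := by
        intro kv hm hk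
        have : dA.getD kv.1 (0, 0) = kv.2 :=
          PySem.Dict.getD_of_mem_items dA (by exact hm) hnd (0, 0)
        rw [hk, hgA] at this; exact this.symm
      refine ⟨?_, PySem.Dict.nodup_keys_insert dA s _ hnd, ?_, ?_, ?_⟩
      · rw [PySem.Dict.items_insert, PySem.Dict.items_insert, if_pos hc, if_pos hBc, hrel,
          List.map_map, List.map_map]
        apply List.map_congr_left
        intro kv _
        by_cases hk : kv.1 = s <;> simp [Function.comp, hk]
      · rw [PySem.Dict.items_insert, if_pos hc, List.pairwise_map]
        refine hpw.imp_of_mem ?_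
        intro a b ha hb hab
        have ea : (if (a.1 == s) = true then (s, (fp.1 + 1, fp.2)) else a).2.2 = a.2.2 := by
          by_cases hka : a.1 = s
          · have hv := hval a ha hka; simp [hka, ← hv]
          · simp [hka]
        have eb : (if (b.1 == s) = true then (s, (fp.1 + 1, fp.2)) else b).2.2 = b.2.2 := by
          by_cases hkb : b.1 = s
          · have hv := hval b hb hkb; simp [hkb, ← hv]
          · simp [hkb]
        rw [ea, eb]; exact hab
      · intro kv hm
        rw [PySem.Dict.items_insert, if_pos hc] at hm
        obtain ⟨q, hq, hqe⟩ := List.mem_map.1 hm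
        have hql := hlt q hq
        rw [← hqe]
        by_cases hk : q.1 = s
        · have hv := hval q hq hk
          have h2 : fp.2 = q.2.2 := by rw [hv]
          simp only [hk, beq_self_eq_true, if_true]
          omega
        · simp only [beq_iff_eq, hk, if_false]
          omega
      · intro kv hm
        rw [PySem.Dict.items_insert, if_pos hc] at hm
        obtain ⟨q, hq, hqe⟩ := List.mem_map.1 hm
        have hqf := hfr q hq
        rw [← hqe]
        by_cases hk : q.1 = s
        · have hv := hval q hq hk
          have h2 : fp.1 = q.2.1 := by rw [hv]
          simp only [hk, beq_self_eq_true, if_true]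
          omega
        · simp only [beq_iff_eq, hk, if_false]
          omega
    · -- fresh key: both dicts append
      have hBc : dB.contains s = false := by rw [hcont]; simpa using hc
      have hA : (if dA.contains s = true then dA else dA.insert s (0, i)).modify s (0, 0)
          (fun fp => (fp.1 + 1, fp.2)) = dA.insert s (1, i) := by
        rw [if_neg hc]
        unfold PySem.Dict.modify
        rw [PySem.Dict.getD_insert_self, PySem.Dict.insert_insert_self]
        norm_num
      have hgB : dB.getD s 0 = 0 := PySem.Dict.getD_of_not_contains dB 0 hBc
      rw [hA, hgB]
      have hcB : dA.contains s = false := by simpa using hc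
      refine ⟨?_, PySem.Dict.nodup_keys_insert dA s _ hnd, ?_, ?_, ?_⟩
      · rw [PySem.Dict.items_insert, PySem.Dict.items_insert, if_neg (by simp [hBc]),
          if_neg (by simp [hcB]), hrel, List.map_append]
        rfl
      · rw [PySem.Dict.items_insert, if_neg (by simp [hcB]), List.pairwise_append]
        exact ⟨hpw, List.pairwise_singleton _ _, fun a ha b hb => by
          simp only [List.mem_singleton] at hb
          subst hb; exact hlt a ha⟩
      · intro kv hm
        rw [PySem.Dict.items_insert, if_neg (by simp [hcB])] at hm
        rcases List.mem_append.1 hm with hm | hm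
        · have := hlt kv hm; omega
        · simp only [List.mem_singleton] at hm; subst hm; simp
      · intro kv hm
        rw [PySem.Dict.items_insert, if_neg (by simp [hcB])] at hm
        rcases List.mem_append.1 hm with hm | hm
        · exact hfr kv hm
        · simp only [List.mem_singleton] at hm; subst hm; simp

theorem pvInv_fold (ws : List String) (i : Int) (dA : PySem.Dict String (Int × Int))
    (dB : PySem.Dict String Int) (h : pvInv i dA dB) :
    pvInv (i + ws.length) ((PySem.List.enumerate ws i).foldl pvAStep dA) (ws.foldl pvBStep dB) := by
  induction ws generalizing i dA dB with
  | nil => simpa using h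
  | cons w t ih =>
    rw [PySem.List.enumerate_cons]
    simp only [List.foldl_cons]
    have := ih (i + 1) _ _ (pvInv_step i w dA dB h)
    have harith : i + 1 + (t.length : Int) = i + ((w :: t).length : Int) := by
      simp [List.length_cons]; omega
    rwa [harith] at this

-- sorted2 with keys (freq, -1*pos) reverse=True is sorted with a lexicographic key
theorem pvSorted2_eq_sorted_lex (xs : List (String × Int × Int)) :
    PySem.List.sorted2 xs (fun x => x.2.1) (fun x => -1 * x.2.2) true
      = PySem.List.sorted xs (fun x => toLex (x.2.1, -1 * x.2.2)) true := by
  unfold PySem.List.sorted2 PySem.List.sorted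
  simp only []
  congr 1
  funext acc x
  congr 1
  funext a b
  simp only [Prod.Lex.lt_iff]
  by_cases h1 : b.2.1 < a.2.1 <;> by_cases h2 : a.2.1 < b.2.1 <;>
    simp [h1, h2] <;> omega

-- partition-into-buckets permutation
theorem pvPerm_flatMap_filter {α : Type} (fs : List Int) (l : List α) (v : α → Int)
    (hnd : fs.Nodup) (hall : ∀ x ∈ l, v x ∈ fs) :
    (fs.flatMap (fun f => l.filter (fun x => v x = f))).Perm l := by
  induction fs generalizing l with
  | nil =>
    cases l with
    | nil => simp
    | cons x t => exact absurd (hall x (by simp)) (by simp)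
  | cons f fs ih =>
    simp only [List.flatMap_cons]
    have hnd' := List.nodup_cons.1 hnd
    have htail : fs.flatMap (fun f' => l.filter (fun x => decide (v x = f')))
        = fs.flatMap (fun f' => (l.filter (fun x => !decide (v x = f))).filter
            (fun x => decide (v x = f'))) := by
      apply List.flatMap_congr
      intro f' hf'
      have hff' : f' ≠ f := fun he => hnd'.1 (he ▸ hf')
      rw [List.filter_filter]
      apply List.filter_congr
      intro x _
      by_cases hx : v x = f'
      · simp [hx, hff']
      · simp [hx]
    rw [htail]
    have hperm2 := ih (l.filter (fun x => !decide (v x = f))) hnd'.2 (fun x hx => by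
      obtain ⟨hxl, hxf⟩ := List.mem_filter.1 hx
      have hm := hall x hxl
      simp only [List.mem_cons] at hm
      rcases hm with h | h
      · exact absurd (by simpa using h : decide (v x = f) = true) (by simpa using hxf)
      · exact h)
    refine List.Perm.trans ?_ (List.filter_append_perm (fun x => decide (v x = f)) l)
    exact hperm2.append_left _

-- buckets characterisation
theorem pvBuckets_spec (l : List (String × Int)) (n : Nat)
    (hall : ∀ wf ∈ l, 0 ≤ wf.2 ∧ wf.2 < (n : Int)) (bs : List (List String)) (hbs : bs.length = n) :
    (l.foldl (fun bs wf => PySem.List.pySetD bs wf.2 (PySem.List.pyGetD bs wf.2 [] ++ [wf.1])) bs).length = n ∧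
    ∀ j : Nat, j < n →
      (l.foldl (fun bs wf => PySem.List.pySetD bs wf.2 (PySem.List.pyGetD bs wf.2 [] ++ [wf.1])) bs).getD j []
        = bs.getD j [] ++ (l.filter (fun wf => wf.2 = (j : Int))).map (·.1) := by
  induction l generalizing bs with
  | nil => exact ⟨hbs, fun j hj => by simp⟩
  | cons wf t ih =>
    obtain ⟨h0, hn⟩ := hall wf (by simp)
    simp only [List.foldl_cons]
    rw [PySem.List.pySetD_of_nonneg bs _ h0, PySem.List.pyGetD_of_nonneg bs _ h0]
    have hlen : (bs.set wf.2.toNat (bs.getD wf.2.toNat [] ++ [wf.1])).length = n := by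
      simp [hbs]
    obtain ⟨hl1, hl2⟩ := ih (fun q hq => hall q (by simp [hq])) _ hlen
    refine ⟨hl1, fun j hj => ?_⟩
    rw [hl2 j hj]
    have hgd : (bs.set wf.2.toNat (bs.getD wf.2.toNat [] ++ [wf.1])).getD j []
        = if wf.2.toNat = j then bs.getD j [] ++ [wf.1] else bs.getD j [] := by
      unfold List.getD
      by_cases he : wf.2.toNat = j
      · subst he; simp [hbs, hj]
      · simp [he]
    rw [hgd, List.filter_cons]
    by_cases he : wf.2.toNat = j
    · have hwfj : wf.2 = (j : Int) := by omega
      rw [if_pos he]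
      simp [hwfj, List.append_assoc]
    · have hwfj : ¬ wf.2 = (j : Int) := by omega
      rw [if_neg he]
      simp [hwfj]

-- the sort key of A as a lexicographic key
def pvKey (kv : String × Int × Int) : Lex (Int × Int) := toLex (kv.2.1, -1 * kv.2.2)

-- the whole pipeline, for an arbitrary word list
theorem pvMain (ws : List String) :
    (let frequency := (PySem.List.enumerate ws 0).foldl pvAStep PySem.Dict.empty
     let words2 := frequency.items.foldl (fun acc wf => acc ++ [wf]) []
     let sortedW := PySem.List.sorted2 words2 (fun item => item.2.1) (fun item => -1 * item.2.2) true
     sortedW.foldl (fun res wf => res ++ [[wf.1, PySem.Int.toStr wf.2.1]]) [])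
    =
    (let counts := ws.foldl pvBStep PySem.Dict.empty
     if counts.items = [] then []
     else
       let maxf := (PySem.List.max? counts.values (fun v => v)).getD 0
       let buckets0 : List (List String) := (PySem.List.pyRange 0 (maxf + 1) 1).map (fun _ => [])
       let buckets := counts.items.foldl
         (fun bs wf => PySem.List.pySetD bs wf.2 (PySem.List.pyGetD bs wf.2 [] ++ [wf.1])) buckets0
       (PySem.List.pyRange maxf 0 (-1)).foldl
         (fun res f => (PySem.List.pyGetD buckets f []).foldl
           (fun r w => r ++ [[w, PySem.Int.toStr f]]) res) []) := by
  obtain ⟨hrel, hnd, hpw, hlt, hfr⟩ := pvInv_fold ws 0 PySem.Dict.empty PySem.Dict.empty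
    (by refine ⟨rfl, ?_, ?_, ?_, ?_⟩ <;> simp [PySem.Dict.empty, PySem.Dict.keys])
  dsimp only
  set LA := ((PySem.List.enumerate ws 0).foldl pvAStep PySem.Dict.empty).items with hLAdef
  set LB := (ws.foldl pvBStep PySem.Dict.empty).items with hLBdef
  rw [PySem.List.foldl_append_singleton_eq_self, List.nil_append, pvSorted2_eq_sorted_lex,
    PySem.List.foldl_append_singleton_eq_map, List.nil_append]
  by_cases hLB : LB = []
  · rw [if_pos hLB]
    have hLA : LA = [] := by
      rw [hLB] at hrel
      exact (List.map_eq_nil_iff).1 hrel.symm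
    rw [hLA]
    rfl
  · rw [if_neg hLB]
    -- the maximum frequency
    have hvals : (ws.foldl pvBStep PySem.Dict.empty).values = LB.map (fun wf => wf.2) := rfl
    obtain ⟨m, hm⟩ : ∃ m, PySem.List.max? ((ws.foldl pvBStep PySem.Dict.empty).values)
        (fun v => v) = some m := by
      cases hq : PySem.List.max? ((ws.foldl pvBStep PySem.Dict.empty).values) (fun v => v)
      · rw [PySem.List.max?_eq_none_iff, hvals, List.map_eq_nil_iff] at hq
        exact absurd hq hLB
      · exact ⟨_, rfl⟩
    rw [hm]
    simp only [Option.getD_some]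
    have hub : ∀ wf ∈ LB, wf.2 ≤ m := by
      intro wf hwf
      exact PySem.List.max?_isMax hm _ (by rw [hvals]; exact List.mem_map_of_mem hwf)
    have hfreq1 : ∀ wf ∈ LB, 1 ≤ wf.2 := by
      intro wf hwf
      rw [hrel] at hwf
      obtain ⟨kv, hkv, hkve⟩ := List.mem_map.1 hwf
      rw [← hkve]
      exact hfr kv hkv
    have hm1 : 1 ≤ m := by
      obtain ⟨v, hv⟩ := List.exists_mem_of_ne_nil LB hLB
      have := hfreq1 v hv
      have := hub v hv
      omega
    have hN : (((m + 1).toNat : Int)) = m + 1 := by omega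
    -- buckets
    have hb0 : (PySem.List.pyRange 0 (m + 1) 1).map (fun _ => ([] : List String))
        = List.replicate (m + 1).toNat [] := by
      rw [List.map_const', PySem.List.length_pyRange_one]
      norm_num
    have hall : ∀ wf ∈ LB, 0 ≤ wf.2 ∧ wf.2 < (((m + 1).toNat : Nat) : Int) := by
      intro wf hwf
      have := hfreq1 wf hwf
      have := hub wf hwf
      omega
    obtain ⟨hblen, hbget⟩ := pvBuckets_spec LB (m + 1).toNat hall
      (List.replicate (m + 1).toNat []) (List.length_replicate)
    rw [hb0]
    -- flatten B's two nested appending loops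
    simp only [PySem.List.foldl_append_singleton_eq_map]
    rw [show (fun (res : List (List String)) (f : Int) =>
          res ++ (PySem.List.pyGetD (LB.foldl (fun bs wf => PySem.List.pySetD bs wf.2
            (PySem.List.pyGetD bs wf.2 [] ++ [wf.1])) (List.replicate (m + 1).toNat [])) f []).map
            (fun w => [w, PySem.Int.toStr f]))
        = (fun res f => res ++ ((PySem.List.pyGetD (LB.foldl (fun bs wf => PySem.List.pySetD bs wf.2
            (PySem.List.pyGetD bs wf.2 [] ++ [wf.1])) (List.replicate (m + 1).toNat [])) f []).map
            (fun w => [w, PySem.Int.toStr f]))) from rfl,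
      PySem.List.foldl_append_eq_flatMap, List.nil_append]
    -- A's sorted output named as a flatMap of filters
    have hsorted : PySem.List.sorted LA pvKey true
        = (PySem.List.pyRange m 0 (-1)).flatMap
            (fun f => LA.filter (fun kv => decide (kv.2.1 = f))) := by
      apply PySem.List.sorted_rev_eq_of_perm_of_pairwise_gt
      · exact pvPerm_flatMap_filter (PySem.List.pyRange m 0 (-1)) LA (fun kv => kv.2.1)
          (by rw [PySem.List.pyRange_neg_one_eq_reverse]
              exact List.nodup_reverse.2 (PySem.List.nodup_pyRange_one _ _))
          (by intro kv hkv
              rw [PySem.List.mem_pyRange_neg_one]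
              refine ⟨hfr kv hkv, ?_⟩
              have hmem : (kv.1, kv.2.1) ∈ LB := by
                rw [hrel]; exact List.mem_map_of_mem hkv
              exact hub _ hmem)
      · rw [List.pairwise_flatMap]
        constructor
        · intro f _
          have hsub : (LA.filter (fun kv => decide (kv.2.1 = f))).Pairwise
              (fun a b => a.2.2 < b.2.2) := hpw.sublist List.filter_sublist
          refine hsub.imp_of_mem ?_
          intro a b ha hb hab
          have hfa := of_decide_eq_true (List.mem_filter.1 ha).2
          have hfb := of_decide_eq_true (List.mem_filter.1 hb).2
          unfold pvKey
          refine Prod.Lex.lt_iff.2 (Or.inr ⟨?_, ?_⟩)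
          · show b.2.1 = a.2.1
            rw [hfa, hfb]
          · show -1 * b.2.2 < -1 * a.2.2
            omega
        · have hran : (PySem.List.pyRange m 0 (-1)).Pairwise (fun a b => b < a) := by
            rw [PySem.List.pyRange_neg_one_eq_reverse, List.pairwise_reverse]
            exact PySem.List.pairwise_lt_pyRange_one _ _
          refine hran.imp_of_mem ?_
          intro f1 f2 _ _ hlt12 x hx y hy
          have hx1 := of_decide_eq_true (List.mem_filter.1 hx).2
          have hy1 := of_decide_eq_true (List.mem_filter.1 hy).2
          unfold pvKey
          refine Prod.Lex.lt_iff.2 (Or.inl ?_)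
          show y.2.1 < x.2.1
          rw [hx1, hy1]
          exact hlt12
    have hkeyeq : (fun (x : String × Int × Int) => toLex (x.2.1, -1 * x.2.2)) = pvKey := rfl
    rw [hkeyeq, hsorted, List.map_flatMap]
    -- block by block
    apply List.flatMap_congr
    intro f hf
    obtain ⟨hf0, hfm⟩ := PySem.List.mem_pyRange_neg_one.1 hf
    have hfnn : (0 : Int) ≤ f := by omega
    have hftn : f.toNat < (m + 1).toNat := by omega
    have hcast : ((f.toNat : Nat) : Int) = f := by omega
    rw [PySem.List.pyGetD_of_nonneg _ _ hfnn, hbget f.toNat hftn,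
      List.getD_replicate _ hftn, List.nil_append, hcast, hrel, List.filter_map, List.map_map,
      List.map_map]
    have hpred : ((fun (wf : String × Int) => decide (wf.2 = f)) ∘
        (fun (kv : String × Int × Int) => (kv.1, kv.2.1)))
        = fun kv => decide (kv.2.1 = f) := rfl
    rw [hpred]
    apply List.map_congr_left
    intro kv hkv
    have hkf := of_decide_eq_true (List.mem_filter.1 hkv).2
    simp [Function.comp, hkf]

-- ===== VERDICT (by name: the statement is the Claim_ definition above) =====
theorem word_count_engine_spec : Claim_equal_word_count_engine := by
  intro document _hdom
  unfold Spec_word_count_engine word_count_engine word_count_engine_alt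
  exact pvMain ((PySem.Str.split? document " ").getD [])
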